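-- pv_equiv track=rewrite | github.com/DNGros/R-U-A-Robot | datatoy/explore_profiles.py | get_dialog_examples
-- ===== SOURCE A (Python) =====
-- from typing import Iterable, List, Tuple, Dict, FrozenSet, Set
--
-- def get_dialog_examples(lines) -> Iterable[List[str]]:
--     """Load using the format that ParlAI uses with numbered lines which reset
--     at 1 every examples. This gets all the lines of a sequential set of lines."""
--     out = []
--     for line in lines:
--         if line.startswith("1 ") and out:
--             yield out
--             out = []
--         line_with_number_stripped_out = " ".join(line.split(" ")[1:])
--         out.append(line_with_number_stripped_out)
--     if out:
--         yield out
-- ===== SOURCE B (Python) =====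
-- def get_dialog_examples(lines):
--     """Chunk off one example at a time: scan for the next '1 '-numbered line
--     and yield the number-stripped slice before it."""
--     lines = list(lines)
--     while lines:
--         n = 1
--         while n < len(lines) and not lines[n].startswith("1 "):
--             n += 1
--         yield [" ".join(l.split(" ")[1:]) for l in lines[:n]]
--         lines = lines[n:]
-- ===== Notes on version B (the rewrite author's own statement) =====
-- stated objective: alternative
-- what changed: B repeatedly chunks off the next example by scanning forward for the following '1 '-numbered line and yielding the number-stripped slice, instead of A's accumulate-and-flush loop with an end-of-input flush.
import Mathlib
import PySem

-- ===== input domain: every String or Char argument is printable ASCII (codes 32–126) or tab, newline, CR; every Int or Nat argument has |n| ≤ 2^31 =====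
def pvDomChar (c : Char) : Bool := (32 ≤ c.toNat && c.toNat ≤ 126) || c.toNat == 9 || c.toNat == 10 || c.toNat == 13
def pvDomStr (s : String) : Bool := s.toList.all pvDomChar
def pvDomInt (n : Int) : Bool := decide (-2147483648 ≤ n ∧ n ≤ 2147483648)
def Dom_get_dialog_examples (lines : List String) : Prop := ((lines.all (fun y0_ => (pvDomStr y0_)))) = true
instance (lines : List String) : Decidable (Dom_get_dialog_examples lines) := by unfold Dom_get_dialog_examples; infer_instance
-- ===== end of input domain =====

-- B chunks off one example at a time (scan for the next '1 ' line, slice, recurse)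
-- instead of A's accumulate-and-flush loop; objective: alternative.

-- ===== PORT A =====
-- helper: " ".join(line.split(" ")[1:]) — identical expression in both Source A and Source B
def stripNum (line : String) : String :=
  PySem.Str.join " " (((PySem.Str.split? line " ").getD []).drop 1)

def get_dialog_examples (lines : List String) : List (List String) :=
  -- state: (yielded examples so far, current `out`)
  let st := lines.foldl (fun (st : List (List String) × List String) line =>
    let st := if PySem.Str.startswith line "1 " && !st.2.isEmpty
              then (st.1 ++ [st.2], []) else st
    (st.1, st.2 ++ [stripNum line])) ([], [])
  if !st.2.isEmpty then st.1 ++ [st.2] else st.1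

-- ===== PORT B =====
-- inner while loop: n starts at 1, advances while lines[n] does not start with "1 "
def findSplit (lines : List String) (n : Nat) : Nat :=
  if h : n < lines.length then
    if PySem.Str.startswith lines[n] "1 " then n else findSplit lines (n + 1)
  else n
termination_by lines.length - n

theorem findSplit_ge (lines : List String) (n : Nat) : n ≤ findSplit lines n := by
  unfold findSplit
  split
  · split
    · exact le_refl n
    · exact le_trans (by omega) (findSplit_ge lines (n + 1))
  · exact le_refl n
termination_by lines.length - n

-- outer while loop of Source B
def get_dialog_examples_alt (lines : List String) : List (List String) :=
  if hne : lines.isEmpty then []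
  else
    let n := findSplit lines 1
    ((lines.take n).map stripNum) :: get_dialog_examples_alt (lines.drop n)
termination_by lines.length
decreasing_by
  have h1 : 1 ≤ findSplit lines 1 := findSplit_ge lines 1
  have : lines.length ≠ 0 := by simpa [List.isEmpty_iff_length_eq_zero] using hne
  simp only [List.length_drop]
  omega

-- ===== PRECONDITION & SPEC =====
def Spec_get_dialog_examples (lines : List String) (out : List (List String)) : Prop := out = get_dialog_examples_alt lines
instance (lines : List String) (out : List (List String)) : Decidable (Spec_get_dialog_examples lines out) := by unfold Spec_get_dialog_examples; infer_instance

-- ===== CLAIM (what is proved, stated in full; the proofs are below) =====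
def Claim_equal_get_dialog_examples : Prop := ∀ (lines : List String), Dom_get_dialog_examples lines → Spec_get_dialog_examples lines (get_dialog_examples lines)

-- ===== LEMMAS AND PROOFS =====

-- mid-level recursive description both ports are reduced to: pvG remaining out
-- (out is the current, nonempty, group of already-stripped lines)
def pvG : List String → List String → List (List String)
  | [], out => [out]
  | l :: ls, out =>
    if PySem.Str.startswith l "1 " then out :: pvG ls [stripNum l]
    else pvG ls (out ++ [stripNum l])

-- A's foldl, started with accumulated results res and nonempty out, finalizes to res ++ pvG ls out
theorem pvA_fold (ls : List String) : ∀ (res : List (List String)) (out : List String), out.isEmpty = false →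
    (let st := ls.foldl (fun (st : List (List String) × List String) line =>
        let st := if PySem.Str.startswith line "1 " && !st.2.isEmpty
                  then (st.1 ++ [st.2], []) else st
        (st.1, st.2 ++ [stripNum line])) (res, out)
     if !st.2.isEmpty then st.1 ++ [st.2] else st.1) = res ++ pvG ls out := by
  induction ls with
  | nil =>
    intro res out ho
    simp only [List.foldl_nil, ho, Bool.not_false, if_true, pvG]
  | cons l ls ih =>
    intro res out ho
    by_cases hs : PySem.Str.startswith l "1 " = true
    · have := ih (res ++ [out]) [stripNum l] (by simp)
      simp only [List.foldl_cons, hs, ho, Bool.not_false, Bool.and_self, if_true, List.nil_append, this, List.append_assoc, pvG, List.singleton_append]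
    · have := ih res (out ++ [stripNum l]) (by simp)
      simp only [List.foldl_cons, hs, Bool.false_and, Bool.false_eq_true, if_false, this, pvG]

-- findSplit on a list with no '1 ' line at positions ≥ n returns the length (when n ≤ length)
theorem findSplit_all_false (lines : List String) (n : Nat) (hn : n ≤ lines.length)
    (h : ∀ i (hi : i < lines.length), n ≤ i → PySem.Str.startswith lines[i] "1 " = false) :
    findSplit lines n = lines.length := by
  unfold findSplit
  split
  · rename_i hlt
    rw [if_neg (by rw [h n hlt (le_refl n)]; simp)]
    exact findSplit_all_false lines (n + 1) (by omega) (fun i hi hni => h i hi (by omega))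
  · omega
termination_by lines.length - n

-- findSplit stops at the first '1 ' line at position m ≥ n
theorem findSplit_first (lines : List String) (n m : Nat) (hm : m < lines.length) (hnm : n ≤ m)
    (hfalse : ∀ i (hi : i < lines.length), n ≤ i → i < m → PySem.Str.startswith lines[i] "1 " = false)
    (htrue : PySem.Str.startswith lines[m] "1 " = true) :
    findSplit lines n = m := by
  unfold findSplit
  rcases Nat.eq_or_lt_of_le hnm with heq | hlt
  · subst heq
    rw [dif_pos hm, if_pos htrue]
  · have hn : n < lines.length := by omega
    rw [dif_pos hn, if_neg (by rw [hfalse n hn (le_refl n) hlt]; simp)]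
    exact findSplit_first lines (n + 1) m hm (by omega) (fun i hi hh1 hh2 => hfalse i hi (by omega) hh2) htrue
termination_by lines.length - n

-- main invariant: outer loop on (c ++ ls), where c is the nonempty current chunk
-- with no '1 ' line after its head, computes pvG ls (c.map stripNum)
theorem pvB_main (ls : List String) : ∀ (c : List String), c ≠ [] →
    (∀ i (hi : i < c.length), 1 ≤ i → PySem.Str.startswith (c.get ⟨i, hi⟩) "1 " = false) →
    get_dialog_examples_alt (c ++ ls) = pvG ls (c.map stripNum) := by
  induction ls with
  | nil =>
    intro c hc htail
    have hlen : 1 ≤ c.length := List.length_pos_iff.mpr hc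
    have hfs : findSplit c 1 = c.length :=
      findSplit_all_false c 1 hlen (fun i hi hni => by simpa using htail i hi hni)
    rw [List.append_nil, get_dialog_examples_alt,
      dif_neg (by simp [List.isEmpty_iff, hc]), hfs]
    simp only [List.take_length, List.drop_length]
    rw [get_dialog_examples_alt]
    simp [pvG]
  | cons l ls ih =>
    intro c hc htail
    have hlen : 1 ≤ c.length := List.length_pos_iff.mpr hc
    by_cases hs : PySem.Str.startswith l "1 " = true
    · have hfs : findSplit (c ++ l :: ls) 1 = c.length := by
        apply findSplit_first (c ++ l :: ls) 1 c.length (by simp) hlen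
        · intro i hi hh1 hh2
          rw [List.getElem_append_left hh2]
          simpa using htail i hh2 hh1
        · rw [List.getElem_append_right (le_refl c.length)]
          simpa using hs
      rw [get_dialog_examples_alt,
        dif_neg (by simp),
        hfs]
      simp only [List.take_left, List.drop_left]
      have hrec : get_dialog_examples_alt (l :: ls) = pvG ls [stripNum l] := by
        simpa using ih [l] (by simp) (by intro i hi h1; simp at hi; omega)
      rw [hrec]
      simp only [pvG]
      rw [if_pos hs]
    · have htail' : ∀ i (hi : i < (c ++ [l]).length), 1 ≤ i →
          PySem.Str.startswith ((c ++ [l]).get ⟨i, hi⟩) "1 " = false := by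
        intro i hi h1
        by_cases hic : i < c.length
        · simp only [List.get_eq_getElem, List.getElem_append_left hic]
          simpa using htail i hic h1
        · simp only [List.get_eq_getElem]
          rw [List.getElem_append_right (by omega : c.length ≤ i)]
          have hz : i - c.length = 0 := by simp at hi; omega
          simp only [hz, List.getElem_cons_zero]
          simpa using hs
      have hstep : c ++ l :: ls = (c ++ [l]) ++ ls := by simp
      rw [hstep, ih (c ++ [l]) (by simp) htail']
      simp only [pvG, List.map_append, List.map]
      rw [if_neg hs]

-- ===== VERDICT (by name: the statement is the Claim_ definition above) =====
theorem get_dialog_examples_spec : Claim_equal_get_dialog_examples := by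
  intro lines _
  unfold Spec_get_dialog_examples get_dialog_examples
  cases lines with
  | nil => simp [get_dialog_examples_alt]
  | cons l0 rest =>
    have hA := pvA_fold rest [] [stripNum l0] (by simp)
    have hB := pvB_main rest [l0] (by simp) (by intro i hi h1; simp at hi; omega)
    simp only [List.nil_append] at hA
    simp only [List.singleton_append, List.map] at hB
    simp only [List.foldl_cons, List.isEmpty_nil, Bool.not_true, Bool.and_false,
      Bool.false_eq_true, if_false, List.nil_append]
    rw [hA, hB]
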